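-- pv_equiv track=rewrite | github.com/fescofesco/CCC | Challenge 2025/Felix/level5/trace_exact_sequences.py | get_path_simultaneous
-- ===== SOURCE A (Python) =====
-- def get_path_simultaneous(x_sequence, y_sequence):
--     """Simultaneous movement - diagonal allowed"""
--     x_time = sum(abs(p) if p != 0 else 1 for p in x_sequence)
--     y_time = sum(abs(p) if p != 0 else 1 for p in y_sequence)
--     max_time = max(x_time, y_time)
--
--     path = []
--
--     x_idx = 0
--     x_pos = 0
--     x_elapsed = 0
--
--     y_idx = 0
--     y_pos = 0
--     y_elapsed = 0
--
--     for t in range(max_time):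
--         # Move X if at start of pace
--         if x_idx < len(x_sequence):
--             x_pace = x_sequence[x_idx]
--             pace_duration = abs(x_pace) if x_pace != 0 else 1
--
--             if x_elapsed == 0 and x_pace != 0:
--                 x_pos += 1 if x_pace > 0 else -1
--
--             x_elapsed += 1
--             if x_elapsed >= pace_duration:
--                 x_idx += 1
--                 x_elapsed = 0
--
--         # Move Y if at start of pace
--         if y_idx < len(y_sequence):
--             y_pace = y_sequence[y_idx]
--             pace_duration = abs(y_pace) if y_pace != 0 else 1
--
--             if y_elapsed == 0 and y_pace != 0:
--                 y_pos += 1 if y_pace > 0 else -1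
--
--             y_elapsed += 1
--             if y_elapsed >= pace_duration:
--                 y_idx += 1
--                 y_elapsed = 0
--
--         path.append((x_pos, y_pos))
--
--     return path
-- ===== SOURCE B (Python) =====
-- def _expand(seq):
--     """Per-axis position list: one entry per time unit."""
--     pos = 0
--     out = []
--     for p in seq:
--         if p == 0:
--             out.append(pos)
--         else:
--             pos += 1 if p > 0 else -1
--             out.extend([pos] * abs(p))
--     return out
--
--
-- def get_path_simultaneous(x_sequence, y_sequence):
--     """Simultaneous movement - diagonal allowed"""
--     xs = _expand(x_sequence)
--     ys = _expand(y_sequence)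
--     n = max(len(xs), len(ys))
--     xs += [xs[-1] if xs else 0] * (n - len(xs))
--     ys += [ys[-1] if ys else 0] * (n - len(ys))
--     return list(zip(xs, ys))
-- ===== Notes on version B (the rewrite author's own statement) =====
-- stated objective: simpler
-- what changed: Replaces A's single time-loop state machine (per-axis index/elapsed counters advanced in lockstep) with two independent per-axis expansion passes, padding the shorter position list with its last position and zipping the two lists.
import Mathlib
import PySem

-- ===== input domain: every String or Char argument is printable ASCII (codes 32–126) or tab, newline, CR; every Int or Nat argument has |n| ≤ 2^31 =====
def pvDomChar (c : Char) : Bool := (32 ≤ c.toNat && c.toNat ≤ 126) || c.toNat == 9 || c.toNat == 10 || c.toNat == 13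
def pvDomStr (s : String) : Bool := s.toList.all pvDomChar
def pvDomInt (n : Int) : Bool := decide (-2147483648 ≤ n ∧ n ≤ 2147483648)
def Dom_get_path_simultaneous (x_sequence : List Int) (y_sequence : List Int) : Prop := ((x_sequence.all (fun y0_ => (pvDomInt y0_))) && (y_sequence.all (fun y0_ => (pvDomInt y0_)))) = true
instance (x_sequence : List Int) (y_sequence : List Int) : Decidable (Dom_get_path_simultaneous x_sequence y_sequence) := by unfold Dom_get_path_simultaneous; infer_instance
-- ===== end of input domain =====

-- B builds each axis's position-per-time-unit list independently, pads with the last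
-- position and zips, instead of A's interleaved index/elapsed state machine (objective: simpler).

-- ===== PORT A =====
-- literal transliteration of A: the time loop carries (path, (x_idx,x_pos,x_elapsed), (y_idx,y_pos,y_elapsed))
def get_path_simultaneous (x_sequence : List Int) (y_sequence : List Int) : List (Int × Int) :=
  let x_time : Int := (x_sequence.map (fun p => if p ≠ 0 then |p| else 1)).sum
  let y_time : Int := (y_sequence.map (fun p => if p ≠ 0 then |p| else 1)).sum
  let max_time : Int := max x_time y_time
  let result :=
    (PySem.List.pyRange 0 max_time 1).foldl
      (fun (st : List (Int × Int) × (Nat × Int × Int) × (Nat × Int × Int)) (_t : Int) =>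
        match st with
        | (path, (x_idx, x_pos, x_elapsed), (y_idx, y_pos, y_elapsed)) =>
          let xst :=
            if x_idx < x_sequence.length then
              let x_pace := (PySem.List.pyGet? x_sequence (x_idx : Int)).getD 0
              let pace_duration : Int := if x_pace ≠ 0 then |x_pace| else 1
              let x_pos := if x_elapsed = 0 ∧ x_pace ≠ 0 then x_pos + (if x_pace > 0 then 1 else -1) else x_pos
              let x_elapsed := x_elapsed + 1
              if x_elapsed ≥ pace_duration then (x_idx + 1, x_pos, (0 : Int)) else (x_idx, x_pos, x_elapsed)
            else (x_idx, x_pos, x_elapsed)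
          let yst :=
            if y_idx < y_sequence.length then
              let y_pace := (PySem.List.pyGet? y_sequence (y_idx : Int)).getD 0
              let pace_duration : Int := if y_pace ≠ 0 then |y_pace| else 1
              let y_pos := if y_elapsed = 0 ∧ y_pace ≠ 0 then y_pos + (if y_pace > 0 then 1 else -1) else y_pos
              let y_elapsed := y_elapsed + 1
              if y_elapsed ≥ pace_duration then (y_idx + 1, y_pos, (0 : Int)) else (y_idx, y_pos, y_elapsed)
            else (y_idx, y_pos, y_elapsed)
          (path ++ [(xst.2.1, yst.2.1)], xst, yst))
      ([], (0, 0, 0), (0, 0, 0))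
  result.1

-- ===== PORT B =====
-- per-axis expansion: one position entry per time unit
def expandAxis (seq : List Int) : List Int :=
  (seq.foldl
    (fun (st : Int × List Int) p =>
      if p = 0 then (st.1, st.2 ++ [st.1])
      else
        let pos := st.1 + (if p > 0 then 1 else -1)
        (pos, st.2 ++ List.replicate p.natAbs pos))
    (0, [])).2

def get_path_simultaneous_alt (x_sequence : List Int) (y_sequence : List Int) : List (Int × Int) :=
  let xs := expandAxis x_sequence
  let ys := expandAxis y_sequence
  let n := max xs.length ys.length
  let xs' := xs ++ List.replicate (n - xs.length) (xs.getLast?.getD 0)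
  let ys' := ys ++ List.replicate (n - ys.length) (ys.getLast?.getD 0)
  xs'.zip ys'

-- ===== PRECONDITION & SPEC =====
def Spec_get_path_simultaneous (x_sequence : List Int) (y_sequence : List Int) (out : List (Int × Int)) : Prop := out = get_path_simultaneous_alt x_sequence y_sequence
instance (x_sequence : List Int) (y_sequence : List Int) (out : List (Int × Int)) : Decidable (Spec_get_path_simultaneous x_sequence y_sequence out) := by unfold Spec_get_path_simultaneous; infer_instance

-- ===== CLAIM (what is proved, stated in full; the proofs are below) =====
def Claim_equal_get_path_simultaneous : Prop := ∀ (x_sequence : List Int) (y_sequence : List Int), Dom_get_path_simultaneous x_sequence y_sequence → Spec_get_path_simultaneous x_sequence y_sequence (get_path_simultaneous x_sequence y_sequence)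

-- ===== LEMMAS AND PROOFS =====

-- the single-axis step of A's loop body
def stepAx (seq : List Int) (st : Nat × Int × Int) : Nat × Int × Int :=
  match st with
  | (idx, pos, e) =>
    if idx < seq.length then
      let pace := (PySem.List.pyGet? seq (idx : Int)).getD 0
      let dur : Int := if pace ≠ 0 then |pace| else 1
      let pos := if e = 0 ∧ pace ≠ 0 then pos + (if pace > 0 then 1 else -1) else pos
      let e := e + 1
      if e ≥ dur then (idx + 1, pos, (0 : Int)) else (idx, pos, e)
    else (idx, pos, e)

def cstep (xs ys : List Int)
    (st : List (Int × Int) × (Nat × Int × Int) × (Nat × Int × Int)) :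
    List (Int × Int) × (Nat × Int × Int) × (Nat × Int × Int) :=
  (st.1 ++ [((stepAx xs st.2.1).2.1, (stepAx ys st.2.2).2.1)], stepAx xs st.2.1, stepAx ys st.2.2)

-- positions emitted by one axis over n time steps
def traceAx (seq : List Int) (st : Nat × Int × Int) : Nat → List Int
  | 0 => []
  | n + 1 => (stepAx seq st).2.1 :: traceAx seq (stepAx seq st) n

-- drop-based axis machine (remaining sequence instead of an index)
def dstep (st : List Int × Int × Int) : List Int × Int × Int :=
  match st with
  | ([], pos, e) => ([], pos, e)
  | (p :: rest, pos, e) =>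
    let dur : Int := if p ≠ 0 then |p| else 1
    let pos := if e = 0 ∧ p ≠ 0 then pos + (if p > 0 then 1 else -1) else pos
    if e + 1 ≥ dur then (rest, pos, 0) else (p :: rest, pos, e + 1)

def dtrace (st : List Int × Int × Int) : Nat → List Int
  | 0 => []
  | n + 1 => (dstep st).2.1 :: dtrace (dstep st) n

def mov (pos p : Int) : Int := if p = 0 then pos else pos + (if p > 0 then 1 else -1)
def durN (p : Int) : Nat := if p = 0 then 1 else p.natAbs
def timeN (seq : List Int) : Nat := (seq.map durN).sum

def expandFrom (pos : Int) : List Int → List Int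
  | [] => []
  | p :: rest => List.replicate (durN p) (mov pos p) ++ expandFrom (mov pos p) rest

def finalPos (pos : Int) : List Int → Int
  | [] => pos
  | p :: rest => finalPos (mov pos p) rest

lemma dstep_cons (p : Int) (rest : List Int) (pos e : Int) :
    dstep (p :: rest, pos, e) =
      if e + 1 ≥ (if p ≠ 0 then |p| else 1)
      then (rest, (if e = 0 ∧ p ≠ 0 then pos + (if p > 0 then 1 else -1) else pos), (0 : Int))
      else (p :: rest, (if e = 0 ∧ p ≠ 0 then pos + (if p > 0 then 1 else -1) else pos), e + 1) := rfl

lemma foldl_const_iter {α σ : Type} (f : σ → σ) (g : σ → α → σ) (h : ∀ s a, g s a = f s) :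
    ∀ (l : List α) (s : σ), l.foldl g s = f^[l.length] s := by
  intro l
  induction l with
  | nil => intro s; rfl
  | cons a t ih =>
    intro s
    simp only [List.foldl_cons, List.length_cons, h]
    rw [ih, ← Function.iterate_succ_apply]

lemma loop_trace (xs ys : List Int) :
    ∀ (n : Nat) (path : List (Int × Int)) (a b : Nat × Int × Int),
      ((cstep xs ys)^[n] (path, a, b)).1 = path ++ (traceAx xs a n).zip (traceAx ys b n) := by
  intro n
  induction n with
  | zero => intro path a b; simp [traceAx]
  | succ n ih =>
    intro path a b
    rw [Function.iterate_succ_apply]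
    rw [show cstep xs ys (path, a, b) =
        (path ++ [((stepAx xs a).2.1, (stepAx ys b).2.1)], stepAx xs a, stepAx ys b) from rfl]
    rw [ih]
    simp [traceAx, List.append_assoc]

lemma stepAx_dstep (seq : List Int) (idx : Nat) (pos e : Int) :
    (seq.drop (stepAx seq (idx, pos, e)).1, (stepAx seq (idx, pos, e)).2) =
      dstep (seq.drop idx, pos, e) := by
  by_cases h : idx < seq.length
  · have hd : seq.drop idx = seq[idx] :: seq.drop (idx + 1) := (List.getElem_cons_drop h).symm
    have hg : (PySem.List.pyGet? seq (idx : Int)).getD 0 = seq[idx] := by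
      rw [PySem.List.pyGet?_natCast, List.getElem?_eq_getElem h]; rfl
    rw [hd, dstep_cons]
    simp only [stepAx, if_pos h, hg]
    split_ifs <;> first | rfl | rw [hd]
  · have hd : seq.drop idx = [] := List.drop_eq_nil_of_le (by omega)
    simp [stepAx, if_neg h, hd, dstep]

lemma trace_bridge (seq : List Int) :
    ∀ (n : Nat) (idx : Nat) (pos e : Int),
      traceAx seq (idx, pos, e) n = dtrace (seq.drop idx, pos, e) n := by
  intro n
  induction n with
  | zero => intro idx pos e; rfl
  | succ n ih =>
    intro idx pos e
    have hs := stepAx_dstep seq idx pos e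
    rcases hst : stepAx seq (idx, pos, e) with ⟨i', p', e'⟩
    rw [hst] at hs
    simp only [traceAx, dtrace, hst, ← hs]
    rw [ih i' p' e']

lemma dtrace_nil (pos e : Int) : ∀ n, dtrace ([], pos, e) n = List.replicate n pos := by
  intro n
  induction n with
  | zero => rfl
  | succ n ih => simp [dtrace, dstep, ih, List.replicate_succ]

lemma dtrace_mid (p : Int) (rest : List Int) :
    ∀ (j : Nat) (e : Int) (m : Nat) (pos : Int), 1 ≤ e → e + (j : Int) + 1 = (if p ≠ 0 then |p| else 1) →
      dtrace (p :: rest, pos, e) (j + 1 + m) =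
        List.replicate (j + 1) pos ++ dtrace (rest, pos, 0) m := by
  intro j
  induction j with
  | zero =>
    intro e m pos h1 h2
    have hgn : ¬ (e = 0 ∧ p ≠ 0) := by rintro ⟨he, -⟩; omega
    have hd : dstep (p :: rest, pos, e) = (rest, pos, 0) := by
      rw [dstep_cons]
      simp only [if_neg hgn]
      rw [if_pos (by rw [← h2]; push_cast; omega)]
    rw [show 0 + 1 + m = m + 1 by omega]
    simp [dtrace, hd, List.replicate_succ]
  | succ j ih =>
    intro e m pos h1 h2
    have hgn : ¬ (e = 0 ∧ p ≠ 0) := by rintro ⟨he, -⟩; omega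
    have hlt : ¬ (e + 1 ≥ (if p ≠ 0 then |p| else 1)) := by rw [← h2]; push_cast; omega
    have hd : dstep (p :: rest, pos, e) = (p :: rest, pos, e + 1) := by
      rw [dstep_cons]
      simp only [if_neg hgn]
      rw [if_neg hlt]
    rw [show j + 1 + 1 + m = (j + 1 + m) + 1 by omega]
    simp only [dtrace, hd]
    rw [ih (e + 1) m pos (by omega) (by push_cast at h2 ⊢; omega)]
    rw [show j + 1 + 1 = (j + 1) + 1 from rfl]
    simp [List.replicate_succ]

lemma dtrace_pace (p : Int) (rest : List Int) (pos : Int) (m : Nat) :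
    dtrace (p :: rest, pos, 0) (durN p + m) =
      List.replicate (durN p) (mov pos p) ++ dtrace (rest, mov pos p, 0) m := by
  by_cases hp : p = 0
  · subst hp
    have hd : dstep ((0 : Int) :: rest, pos, 0) = (rest, pos, 0) := by
      rw [dstep_cons]; norm_num
    rw [show durN (0 : Int) + m = m + 1 by simp [durN]; omega]
    simp [dtrace, hd, mov, durN, List.replicate_succ]
  · have habs : |p| = (p.natAbs : Int) := Int.abs_eq_natAbs p
    by_cases h1 : p.natAbs = 1
    · have hd : dstep (p :: rest, pos, 0) = (rest, pos + (if p > 0 then 1 else -1), 0) := by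
        rw [dstep_cons]
        rw [if_pos (by rw [if_pos hp, habs, h1]; norm_num)]
        rw [if_pos ⟨rfl, hp⟩]
      rw [show durN p + m = m + 1 by simp [durN, hp]; omega]
      simp [dtrace, hd, mov, durN, hp, h1, List.replicate_succ]
    · have hge : 2 ≤ p.natAbs := by have := Int.natAbs_pos.mpr hp; omega
      have hlt : ¬ ((0 : Int) + 1 ≥ (if p ≠ 0 then |p| else 1)) := by
        rw [if_pos hp, habs]; push_cast; omega
      have hd : dstep (p :: rest, pos, 0) = (p :: rest, pos + (if p > 0 then 1 else -1), 1) := by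
        rw [dstep_cons]
        rw [if_neg hlt]
        rw [if_pos ⟨rfl, hp⟩]
        norm_num
      rw [show durN p + m = ((p.natAbs - 2) + 1 + m) + 1 by simp [durN, hp]; omega]
      simp only [dtrace, hd]
      rw [dtrace_mid p rest (p.natAbs - 2) 1 m (pos + (if p > 0 then 1 else -1)) (by norm_num)
        (by rw [if_pos hp, habs]; push_cast; omega)]
      rw [show durN p = ((p.natAbs - 2) + 1) + 1 by simp [durN, hp]; omega]
      simp [List.replicate_succ, mov, hp]

lemma dtrace_expand : ∀ (seq : List Int) (pos : Int) (m : Nat),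
    dtrace (seq, pos, 0) (timeN seq + m) =
      expandFrom pos seq ++ List.replicate m (finalPos pos seq) := by
  intro seq
  induction seq with
  | nil => intro pos m; simp [timeN, expandFrom, finalPos, dtrace_nil]
  | cons p rest ih =>
    intro pos m
    have ht : timeN (p :: rest) = durN p + timeN rest := by simp [timeN]
    rw [ht, Nat.add_assoc, dtrace_pace, ih]
    simp [expandFrom, finalPos, List.append_assoc]

lemma expand_foldl : ∀ (seq : List Int) (pos : Int) (acc : List Int),
    seq.foldl
      (fun (st : Int × List Int) p =>
        if p = 0 then (st.1, st.2 ++ [st.1])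
        else
          let q := st.1 + (if p > 0 then 1 else -1)
          (q, st.2 ++ List.replicate p.natAbs q))
      (pos, acc) = (finalPos pos seq, acc ++ expandFrom pos seq) := by
  intro seq
  induction seq with
  | nil => intro pos acc; simp [finalPos, expandFrom]
  | cons p rest ih =>
    intro pos acc
    by_cases hp : p = 0
    · subst hp
      simp only [List.foldl_cons]
      rw [ih]
      simp [finalPos, expandFrom, mov, durN, List.append_assoc]
    · simp only [List.foldl_cons, if_neg hp]
      rw [ih]
      simp [finalPos, expandFrom, mov, durN, hp, List.append_assoc]

lemma expandAxis_eq (seq : List Int) : expandAxis seq = expandFrom 0 seq := by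
  unfold expandAxis
  rw [expand_foldl]
  simp

lemma length_expandFrom : ∀ (seq : List Int) (pos : Int), (expandFrom pos seq).length = timeN seq := by
  intro seq
  induction seq with
  | nil => intro pos; rfl
  | cons p rest ih => intro pos; simp [expandFrom, timeN, ih, List.map_cons]

lemma getLast_expandFrom : ∀ (seq : List Int) (pos : Int),
    ((expandFrom pos seq).getLast?).getD pos = finalPos pos seq := by
  intro seq
  induction seq with
  | nil => intro pos; rfl
  | cons p rest ih =>
    intro pos
    simp only [expandFrom, finalPos]
    have hd0 : durN p ≠ 0 := by unfold durN; split <;> simp_all [Int.natAbs_eq_zero]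
    rcases he : expandFrom (mov pos p) rest with _ | ⟨a, t⟩
    · have h2 := ih (mov pos p)
      rw [he] at h2
      simp only [List.getLast?_nil, Option.getD_none] at h2
      rw [List.append_nil, List.getLast?_replicate, ← h2]
      simp [hd0]
    · have hne : expandFrom (mov pos p) rest ≠ [] := by rw [he]; simp
      rw [← he, List.getLast?_append_of_ne_nil _ hne]
      have h2 := ih (mov pos p)
      rcases hl : (expandFrom (mov pos p) rest).getLast? with _ | z
      · exact absurd (List.getLast?_eq_none_iff.mp hl) hne
      · rw [hl] at h2; simpa using h2

lemma sum_time : ∀ (seq : List Int),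
    (seq.map (fun p => if p ≠ 0 then |p| else 1)).sum = (timeN seq : Int) := by
  intro seq
  induction seq with
  | nil => rfl
  | cons p rest ih =>
    have ht : timeN (p :: rest) = durN p + timeN rest := by simp [timeN]
    simp only [List.map_cons, List.sum_cons, ih, ht]
    push_cast
    by_cases hp : p = 0
    · simp [hp, durN]
    · rw [if_pos hp, show durN p = p.natAbs by simp [durN, hp], Int.abs_eq_natAbs]

-- ===== VERDICT (by name: the statement is the Claim_ definition above) =====
theorem get_path_simultaneous_spec : Claim_equal_get_path_simultaneous := by
  unfold Claim_equal_get_path_simultaneous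
  intro xs ys _
  unfold Spec_get_path_simultaneous
  have hbody : ∀ (s : List (Int × Int) × (Nat × Int × Int) × (Nat × Int × Int)) (t : Int),
      (fun (st : List (Int × Int) × (Nat × Int × Int) × (Nat × Int × Int)) (_t : Int) =>
        match st with
        | (path, (x_idx, x_pos, x_elapsed), (y_idx, y_pos, y_elapsed)) =>
          let xst :=
            if x_idx < xs.length then
              let x_pace := (PySem.List.pyGet? xs (x_idx : Int)).getD 0
              let pace_duration : Int := if x_pace ≠ 0 then |x_pace| else 1
              let x_pos := if x_elapsed = 0 ∧ x_pace ≠ 0 then x_pos + (if x_pace > 0 then 1 else -1) else x_pos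
              let x_elapsed := x_elapsed + 1
              if x_elapsed ≥ pace_duration then (x_idx + 1, x_pos, (0 : Int)) else (x_idx, x_pos, x_elapsed)
            else (x_idx, x_pos, x_elapsed)
          let yst :=
            if y_idx < ys.length then
              let y_pace := (PySem.List.pyGet? ys (y_idx : Int)).getD 0
              let pace_duration : Int := if y_pace ≠ 0 then |y_pace| else 1
              let y_pos := if y_elapsed = 0 ∧ y_pace ≠ 0 then y_pos + (if y_pace > 0 then 1 else -1) else y_pos
              let y_elapsed := y_elapsed + 1
              if y_elapsed ≥ pace_duration then (y_idx + 1, y_pos, (0 : Int)) else (y_idx, y_pos, y_elapsed)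
            else (y_idx, y_pos, y_elapsed)
          (path ++ [(xst.2.1, yst.2.1)], xst, yst)) s t = cstep xs ys s := by
    intro s t
    rcases s with ⟨path, ⟨xi, xp, xe⟩, ⟨yi, yp, ye⟩⟩
    rfl
  have hA : get_path_simultaneous xs ys =
      ((cstep xs ys)^[max (timeN xs) (timeN ys)] ([], (0, 0, 0), (0, 0, 0))).1 := by
    simp only [get_path_simultaneous]
    rw [foldl_const_iter (cstep xs ys) _ hbody, PySem.List.length_pyRange_one,
      sum_time xs, sum_time ys,
      show ((max ((timeN xs : Int)) ((timeN ys : Int))) - 0).toNat = max (timeN xs) (timeN ys) by omega]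
  have hx : dtrace (xs, 0, 0) (max (timeN xs) (timeN ys)) =
      expandFrom 0 xs ++ List.replicate (max (timeN xs) (timeN ys) - timeN xs) (finalPos 0 xs) := by
    have h := dtrace_expand xs 0 (max (timeN xs) (timeN ys) - timeN xs)
    rw [show timeN xs + (max (timeN xs) (timeN ys) - timeN xs) = max (timeN xs) (timeN ys) by omega] at h
    exact h
  have hy : dtrace (ys, 0, 0) (max (timeN xs) (timeN ys)) =
      expandFrom 0 ys ++ List.replicate (max (timeN xs) (timeN ys) - timeN ys) (finalPos 0 ys) := by
    have h := dtrace_expand ys 0 (max (timeN xs) (timeN ys) - timeN ys)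
    rw [show timeN ys + (max (timeN xs) (timeN ys) - timeN ys) = max (timeN xs) (timeN ys) by omega] at h
    exact h
  have hB : get_path_simultaneous_alt xs ys =
      (expandFrom 0 xs ++ List.replicate (max (timeN xs) (timeN ys) - timeN xs) (finalPos 0 xs)).zip
        (expandFrom 0 ys ++ List.replicate (max (timeN xs) (timeN ys) - timeN ys) (finalPos 0 ys)) := by
    simp only [get_path_simultaneous_alt, expandAxis_eq, length_expandFrom]
    rw [getLast_expandFrom xs 0, getLast_expandFrom ys 0]
  rw [hA, hB, loop_trace xs ys _ [] (0, 0, 0) (0, 0, 0),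
    trace_bridge xs _ 0 0 0, trace_bridge ys _ 0 0 0, List.drop_zero, List.drop_zero,
    hx, hy, List.nil_append]
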